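-- pv_equiv track=rewrite | github.com/maxcarriere/lectura-modules | Correcteur/src/lectura_correcteur/_morpho.py | _decompose_tag
-- ===== SOURCE A (Python) =====
-- def _decompose_tag(tag: str) -> dict:
--     """Parse un tag composite en dict structure.
--
--     Exemples :
--         "VER|Ind|Pres|3|Plur" -> {"pos": "VER", "mode": "Ind", ...}
--         "NOM|Masc|Sing"       -> {"pos": "NOM", "genre": "Masc", ...}
--     """
--     parts = tag.split("|")
--     pos = parts[0]
--     traits = parts[1:]
--
--     result = {
--         "pos": pos,
--         "genre": None,
--         "nombre": None,
--         "temps": None,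
--         "mode": None,
--         "personne": None,
--     }
--
--     _GENDERS = {"Masc", "Fem"}
--     _NUMBERS = {"Sing", "Plur"}
--     _TENSES = {"Pres", "Imp", "Past", "Fut"}
--     _MOODS = {"Ind", "Sub", "Cnd", "Imp", "Part", "Inf", "Ger"}
--     _PERSONS = {"1", "2", "3"}
--
--     for t in traits:
--         if t in _GENDERS:
--             result["genre"] = t
--         elif t in _NUMBERS:
--             result["nombre"] = t
--         elif t in _TENSES:
--             result["temps"] = t
--         elif t in _MOODS:
--             result["mode"] = t
--         elif t in _PERSONS:
--             result["personne"] = t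
--
--     return result
-- ===== SOURCE B (Python) =====
-- # Field-wise decomposition: for each result field, one backward scan of the traits
-- # picks the last trait belonging to that field's value set (last assignment wins in A),
-- # replacing A's single forward pass that classifies each trait with an if/elif cascade.
-- # "Imp" can only ever be a tense under A's elif order, so the mood set omits it here.
-- _FIELD_VALUES = [
--     ("genre", ("Masc", "Fem")),
--     ("nombre", ("Sing", "Plur")),
--     ("temps", ("Pres", "Imp", "Past", "Fut")),
--     ("mode", ("Ind", "Sub", "Cnd", "Part", "Inf", "Ger")),
--     ("personne", ("1", "2", "3")),
-- ]
--
--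
-- def _decompose_tag(tag: str) -> dict:
--     parts = tag.split("|")
--     traits = parts[1:]
--     result = {"pos": parts[0]}
--     for field, values in _FIELD_VALUES:
--         result[field] = next((t for t in reversed(traits) if t in values), None)
--     return result
-- ===== Notes on version B (the rewrite author's own statement) =====
-- stated objective: alternative
-- what changed: Inverts the loop structure: instead of A's single forward pass over the traits classifying each with a five-way if/elif set cascade, B loops over the five result fields and for each does a backward scan of the traits picking the last trait in that field's value set (last assignment wins), with 'Imp' kept only in the tense set since A's elif order never classifies it as a mood.
import Mathlib
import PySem

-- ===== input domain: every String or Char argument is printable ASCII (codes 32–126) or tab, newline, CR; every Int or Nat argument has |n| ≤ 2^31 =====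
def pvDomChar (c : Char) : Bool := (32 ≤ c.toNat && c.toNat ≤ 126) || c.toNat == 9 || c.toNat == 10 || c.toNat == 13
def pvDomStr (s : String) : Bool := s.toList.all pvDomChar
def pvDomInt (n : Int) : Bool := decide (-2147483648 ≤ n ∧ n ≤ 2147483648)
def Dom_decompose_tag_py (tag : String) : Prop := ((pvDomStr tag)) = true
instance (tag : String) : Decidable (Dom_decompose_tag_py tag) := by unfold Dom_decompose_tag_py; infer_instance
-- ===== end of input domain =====

-- B decomposes field-wise: for each of the five result fields one backward scan of the
-- traits picks the last trait in that field's value set, replacing A's single forward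
-- trait loop with its five-way if/elif cascade; objective: simpler.

-- ===== PORT A =====
def decompose_tag_py (tag : String) : List (String × Option String) :=
  let parts := (PySem.Str.split? tag "|").getD []      -- sep "|" ≠ "" : split? never returns none
  let pos := PySem.List.pyGetD parts 0 ""              -- parts[0]; split always yields ≥ 1 piece, never raises
  let traits := PySem.List.slice parts (some 1) none   -- parts[1:]
  let result : PySem.Dict String (Option String) := PySem.Dict.ofList
    [("pos", some pos), ("genre", none), ("nombre", none),
     ("temps", none), ("mode", none), ("personne", none)]
  (traits.foldl (fun r t =>
    if (PySem.Set.ofList ["Masc","Fem"]).contains t then r.insert "genre" (some t)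
    else if (PySem.Set.ofList ["Sing","Plur"]).contains t then r.insert "nombre" (some t)
    else if (PySem.Set.ofList ["Pres","Imp","Past","Fut"]).contains t then r.insert "temps" (some t)
    else if (PySem.Set.ofList ["Ind","Sub","Cnd","Imp","Part","Inf","Ger"]).contains t then r.insert "mode" (some t)
    else if (PySem.Set.ofList ["1","2","3"]).contains t then r.insert "personne" (some t)
    else r) result).items

-- ===== PORT B =====
-- _FIELD_VALUES from Source B (value tuples as lists)
def pvFieldValues : List (String × List String) :=
  [("genre", ["Masc","Fem"]), ("nombre", ["Sing","Plur"]),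
   ("temps", ["Pres","Imp","Past","Fut"]),
   ("mode", ["Ind","Sub","Cnd","Part","Inf","Ger"]),
   ("personne", ["1","2","3"])]

def decompose_tag_py_alt (tag : String) : List (String × Option String) :=
  let parts := (PySem.Str.split? tag "|").getD []      -- sep "|" ≠ "" : split? never returns none
  let traits := PySem.List.slice parts (some 1) none   -- parts[1:]
  let result : PySem.Dict String (Option String) := PySem.Dict.ofList
    [("pos", some (PySem.List.pyGetD parts 0 ""))]
  (pvFieldValues.foldl (fun r fv =>
    -- result[field] = next((t for t in reversed(traits) if t in values), None)
    r.insert fv.1 (traits.reverse.find? (fun t => fv.2.contains t))) result).items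

-- ===== PRECONDITION & SPEC =====
def Spec_decompose_tag_py (tag : String) (out : List (String × Option String)) : Prop := out = decompose_tag_py_alt tag
instance (tag : String) (out : List (String × Option String)) : Decidable (Spec_decompose_tag_py tag out) := by unfold Spec_decompose_tag_py; infer_instance

-- ===== CLAIM (what is proved, stated in full; the proofs are below) =====
def Claim_equal_decompose_tag_py : Prop := ∀ (tag : String), Dom_decompose_tag_py tag → Spec_decompose_tag_py tag (decompose_tag_py tag)

-- ===== LEMMAS AND PROOFS =====

-- A's per-trait if/elif step, on the six-entry state dict, updates exactly the field
-- whose (disjoint) value list contains t.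
theorem pv_stepA (t : String) (p g n te mo pe : Option String) :
  (if (PySem.Set.ofList ["Masc","Fem"]).contains t then
      (PySem.Dict.mk [("pos",p),("genre",g),("nombre",n),("temps",te),("mode",mo),("personne",pe)]).insert "genre" (some t)
    else if (PySem.Set.ofList ["Sing","Plur"]).contains t then
      (PySem.Dict.mk [("pos",p),("genre",g),("nombre",n),("temps",te),("mode",mo),("personne",pe)]).insert "nombre" (some t)
    else if (PySem.Set.ofList ["Pres","Imp","Past","Fut"]).contains t then
      (PySem.Dict.mk [("pos",p),("genre",g),("nombre",n),("temps",te),("mode",mo),("personne",pe)]).insert "temps" (some t)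
    else if (PySem.Set.ofList ["Ind","Sub","Cnd","Imp","Part","Inf","Ger"]).contains t then
      (PySem.Dict.mk [("pos",p),("genre",g),("nombre",n),("temps",te),("mode",mo),("personne",pe)]).insert "mode" (some t)
    else if (PySem.Set.ofList ["1","2","3"]).contains t then
      (PySem.Dict.mk [("pos",p),("genre",g),("nombre",n),("temps",te),("mode",mo),("personne",pe)]).insert "personne" (some t)
    else (PySem.Dict.mk [("pos",p),("genre",g),("nombre",n),("temps",te),("mode",mo),("personne",pe)]))
  = PySem.Dict.mk
      [("pos",p),
       ("genre", if (["Masc","Fem"] : List String).contains t then some t else g),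
       ("nombre", if (["Sing","Plur"] : List String).contains t then some t else n),
       ("temps", if (["Pres","Imp","Past","Fut"] : List String).contains t then some t else te),
       ("mode", if (["Ind","Sub","Cnd","Part","Inf","Ger"] : List String).contains t then some t else mo),
       ("personne", if (["1","2","3"] : List String).contains t then some t else pe)] := by
  rcases eq_or_ne t "Masc" with rfl | h1
  · rfl
  rcases eq_or_ne t "Fem" with rfl | h2
  · rfl
  rcases eq_or_ne t "Sing" with rfl | h3
  · rfl
  rcases eq_or_ne t "Plur" with rfl | h4
  · rfl
  rcases eq_or_ne t "Pres" with rfl | h5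
  · rfl
  rcases eq_or_ne t "Imp" with rfl | h6
  · rfl
  rcases eq_or_ne t "Past" with rfl | h7
  · rfl
  rcases eq_or_ne t "Fut" with rfl | h8
  · rfl
  rcases eq_or_ne t "Ind" with rfl | h9
  · rfl
  rcases eq_or_ne t "Sub" with rfl | h10
  · rfl
  rcases eq_or_ne t "Cnd" with rfl | h11
  · rfl
  rcases eq_or_ne t "Part" with rfl | h12
  · rfl
  rcases eq_or_ne t "Inf" with rfl | h13
  · rfl
  rcases eq_or_ne t "Ger" with rfl | h14
  · rfl
  rcases eq_or_ne t "1" with rfl | h15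
  · rfl
  rcases eq_or_ne t "2" with rfl | h16
  · rfl
  rcases eq_or_ne t "3" with rfl | h17
  · rfl
  simp [PySem.Set.contains, List.contains_eq_mem, PySem.Set.mem_ofList,
    List.mem_cons, List.not_mem_nil, h1, h2, h3, h4, h5, h6, h7, h8, h9, h10, h11, h12, h13, h14, h15, h16, h17]

-- last-match-or-default: extending the scan by one trait at the front.
theorem pv_findOr_cons (f : String → Bool) (t : String) (ts : List String) (d : Option String) :
  (((t :: ts).reverse.find? f).or d) = ((ts.reverse.find? f).or (if f t then some t else d)) := by
  rw [List.reverse_cons, List.find?_append]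
  cases hts : ts.reverse.find? f <;> simp [List.find?, Option.or] <;> cases hft : f t <;> simp

-- A's fold over the traits, from an arbitrary six-entry state, ends with each field
-- holding the last matching trait (or the field's starting value).
theorem pv_foldA (ts : List String) : ∀ (p g n te mo pe : Option String),
  (ts.foldl (fun r t =>
    if (PySem.Set.ofList ["Masc","Fem"]).contains t then r.insert "genre" (some t)
    else if (PySem.Set.ofList ["Sing","Plur"]).contains t then r.insert "nombre" (some t)
    else if (PySem.Set.ofList ["Pres","Imp","Past","Fut"]).contains t then r.insert "temps" (some t)
    else if (PySem.Set.ofList ["Ind","Sub","Cnd","Imp","Part","Inf","Ger"]).contains t then r.insert "mode" (some t)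
    else if (PySem.Set.ofList ["1","2","3"]).contains t then r.insert "personne" (some t)
    else r)
    (PySem.Dict.mk [("pos",p),("genre",g),("nombre",n),("temps",te),("mode",mo),("personne",pe)])).items
  = [("pos",p),
     ("genre", (ts.reverse.find? (fun t => (["Masc","Fem"] : List String).contains t)).or g),
     ("nombre", (ts.reverse.find? (fun t => (["Sing","Plur"] : List String).contains t)).or n),
     ("temps", (ts.reverse.find? (fun t => (["Pres","Imp","Past","Fut"] : List String).contains t)).or te),
     ("mode", (ts.reverse.find? (fun t => (["Ind","Sub","Cnd","Part","Inf","Ger"] : List String).contains t)).or mo),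
     ("personne", (ts.reverse.find? (fun t => (["1","2","3"] : List String).contains t)).or pe)] := by
  induction ts with
  | nil => intro p g n te mo pe; rfl
  | cons t ts ih =>
    intro p g n te mo pe
    rw [List.foldl_cons, pv_stepA, ih]
    simp only [pv_findOr_cons]

-- Both folds, on an arbitrary parts list, produce the same items list.
theorem pv_eq (parts : List String) :
  ((PySem.List.slice parts (some 1) none).foldl (fun r t =>
    if (PySem.Set.ofList ["Masc","Fem"]).contains t then r.insert "genre" (some t)
    else if (PySem.Set.ofList ["Sing","Plur"]).contains t then r.insert "nombre" (some t)
    else if (PySem.Set.ofList ["Pres","Imp","Past","Fut"]).contains t then r.insert "temps" (some t)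
    else if (PySem.Set.ofList ["Ind","Sub","Cnd","Imp","Part","Inf","Ger"]).contains t then r.insert "mode" (some t)
    else if (PySem.Set.ofList ["1","2","3"]).contains t then r.insert "personne" (some t)
    else r)
    (PySem.Dict.ofList
      [("pos", some (PySem.List.pyGetD parts 0 "")), ("genre", none), ("nombre", none),
       ("temps", none), ("mode", none), ("personne", none)])).items
  = (pvFieldValues.foldl (fun r fv =>
      r.insert fv.1 ((PySem.List.slice parts (some 1) none).reverse.find? (fun t => fv.2.contains t)))
      (PySem.Dict.ofList [("pos", some (PySem.List.pyGetD parts 0 ""))])).items := by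
  rw [show PySem.Dict.ofList
        [("pos", some (PySem.List.pyGetD parts 0 "")), ("genre", (none : Option String)), ("nombre", none),
         ("temps", none), ("mode", none), ("personne", none)]
      = PySem.Dict.mk
        [("pos", some (PySem.List.pyGetD parts 0 "")), ("genre", none), ("nombre", none),
         ("temps", none), ("mode", none), ("personne", none)] from rfl]
  rw [pv_foldA,
    show (pvFieldValues.foldl (fun r fv =>
        r.insert fv.1 ((PySem.List.slice parts (some 1) none).reverse.find? (fun t => fv.2.contains t)))
        (PySem.Dict.ofList [("pos", some (PySem.List.pyGetD parts 0 ""))])).items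
      = [("pos", some (PySem.List.pyGetD parts 0 "")),
         ("genre", (PySem.List.slice parts (some 1) none).reverse.find? (fun t => (["Masc","Fem"] : List String).contains t)),
         ("nombre", (PySem.List.slice parts (some 1) none).reverse.find? (fun t => (["Sing","Plur"] : List String).contains t)),
         ("temps", (PySem.List.slice parts (some 1) none).reverse.find? (fun t => (["Pres","Imp","Past","Fut"] : List String).contains t)),
         ("mode", (PySem.List.slice parts (some 1) none).reverse.find? (fun t => (["Ind","Sub","Cnd","Part","Inf","Ger"] : List String).contains t)),
         ("personne", (PySem.List.slice parts (some 1) none).reverse.find? (fun t => (["1","2","3"] : List String).contains t))] from rfl]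
  simp [Option.or_none]

-- ===== VERDICT (by name: the statement is the Claim_ definition above) =====
theorem decompose_tag_py_spec : Claim_equal_decompose_tag_py := by
  intro tag _
  unfold Spec_decompose_tag_py decompose_tag_py decompose_tag_py_alt
  exact pv_eq ((PySem.Str.split? tag "|").getD [])
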